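-- pv_equiv track=rewrite | github.com/BerkeleyLab/Bedrock | badger/tests/badger_lb_io.py | tx_mac_build
-- ===== SOURCE A (Python) =====
-- def tx_mac_build(contents):
--     # Also see packet2txmac.py
--     addrs = []
--     values = []
--     aw = 10
--     mac_base = 0x100000  # defined in hw_test.v and rtefi_pipe_tb.v
--     mac_ctl = mac_base + (1 << aw)  # defined in mac_subset.v
--     buf_start = 16  # arbitrary
--     data_start = mac_base + buf_start + 1
--     n = 0
--     ov = None
--     addrs += [mac_ctl + 1]  # acknowledge last packet (!?)
--     values += [0]
--     for v in contents:
--         if n % 2: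
--             vv = ov + (v << 8)  # little-endian
--             addrs += [data_start + int(n/2)]
--             values += [vv]
--         n += 1
--         ov = v
--     if n % 2:
--         addrs += [data_start + int(n/2)]
--         values += [v]
--     # length of packet
--     addrs += [mac_base + buf_start]
--     values += [n]
--     # trigger send by MAC
--     addrs += [mac_ctl]
--     values += [buf_start]
--     return addrs, values
-- ===== SOURCE B (Python) =====
-- def tx_mac_build(contents):
--     # Whole-list construction indexed by output word slot (random access), no per-byte state.
--     mac_base = 0x100000
--     mac_ctl = mac_base + (1 << 10)
--     buf_start = 16
--     data_start = mac_base + buf_start + 1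
--     n = len(contents)
--     m = (n + 1) // 2  # number of data words
--     addrs = [mac_ctl + 1] + [data_start + i for i in range(m)] + [mac_base + buf_start, mac_ctl]
--     values = ([0]
--               + [contents[2 * i] + (contents[2 * i + 1] << 8) if 2 * i + 1 < n
--                  else contents[2 * i]
--                  for i in range(m)]
--               + [n, buf_start])
--     return addrs, values
-- ===== Notes on version B (the rewrite author's own statement) =====
-- stated objective: alternative
-- what changed: Replaces A's stateful per-byte pass (parity counter n, previous-byte register ov, mid-loop flush and post-loop odd-byte patch) by direct whole-list construction: it computes the word count m=(n+1)//2 up front and builds both lists in one expression, filling each data word slot i by random-access indexing contents[2i] (+ contents[2i+1]<<8 when the high byte exists).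
import Mathlib
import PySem

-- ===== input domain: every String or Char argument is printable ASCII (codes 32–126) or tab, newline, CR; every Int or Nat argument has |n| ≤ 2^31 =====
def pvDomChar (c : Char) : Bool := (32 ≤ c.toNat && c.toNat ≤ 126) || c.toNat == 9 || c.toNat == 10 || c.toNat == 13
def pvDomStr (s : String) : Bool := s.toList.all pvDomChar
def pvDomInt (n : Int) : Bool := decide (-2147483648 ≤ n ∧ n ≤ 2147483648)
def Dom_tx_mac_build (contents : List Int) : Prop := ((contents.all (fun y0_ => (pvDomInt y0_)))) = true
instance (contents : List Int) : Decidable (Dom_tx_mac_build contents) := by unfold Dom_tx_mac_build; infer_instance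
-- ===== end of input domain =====

-- B builds both whole lists directly, filling each data word slot i by random-access
-- indexing (contents[2i], contents[2i+1]) instead of A's stateful per-byte pass;
-- objective: alternative decomposition, same outputs.

-- ===== PORT A =====
-- Loop body of A; state (addrs, values, n, ov); `v << 8` is written as `v * 256` (exact for all Ints).
def pvStepA (ds : Int) (s : List Int × List Int × Int × Option Int) (v : Int) :
    List Int × List Int × Int × Option Int :=
  let (addrs, values, n, ov) := s
  if n % 2 = 1 then
    (addrs ++ [ds + n / 2], values ++ [ov.getD 0 + v * 256], n + 1, some v)
  else
    (addrs, values, n + 1, some v)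

-- Python's trailing `values += [v]` uses the loop variable, which at that point equals ov.
def tx_mac_build (contents : List Int) : List Int × List Int :=
  let mac_base : Int := 0x100000
  let mac_ctl : Int := mac_base + 1024          -- mac_base + (1 << aw), aw = 10
  let buf_start : Int := 16
  let data_start : Int := mac_base + buf_start + 1
  let st := contents.foldl (pvStepA data_start) ([mac_ctl + 1], [0], 0, none)
  let (addrs, values, n, ov) := st
  let (addrs, values) :=
    if n % 2 = 1 then
      (addrs ++ [data_start + n / 2], values ++ [ov.getD 0])
    else (addrs, values)
  (addrs ++ [mac_base + buf_start] ++ [mac_ctl], values ++ [n] ++ [buf_start])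

-- ===== PORT B =====
-- contents[2*i] / contents[2*i + 1] with a nonneg in-range index; `<< 8` is `* 256`.
def tx_mac_build_alt (contents : List Int) : List Int × List Int :=
  let mac_base : Int := 0x100000
  let mac_ctl : Int := mac_base + 1024
  let buf_start : Int := 16
  let data_start : Int := mac_base + buf_start + 1
  let n : Int := contents.length
  let m : Nat := (contents.length + 1) / 2      -- (n + 1) // 2, number of data words
  let addrs := [mac_ctl + 1]
      ++ (List.range m).map (fun (i : Nat) => data_start + (i : Int))
      ++ [mac_base + buf_start, mac_ctl]
  let values := [(0 : Int)]
      ++ (List.range m).map (fun (i : Nat) =>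
            if 2 * (i : Int) + 1 < n then
              (PySem.List.pyGet? contents ((2 * i : Nat) : Int)).getD 0
               + (PySem.List.pyGet? contents ((2 * i + 1 : Nat) : Int)).getD 0 * 256
            else (PySem.List.pyGet? contents ((2 * i : Nat) : Int)).getD 0)
      ++ [n, buf_start]
  (addrs, values)

-- ===== PRECONDITION & SPEC =====
def Spec_tx_mac_build (contents : List Int) (out : List Int × List Int) : Prop := out = tx_mac_build_alt contents
instance (contents : List Int) (out : List Int × List Int) : Decidable (Spec_tx_mac_build contents out) := by unfold Spec_tx_mac_build; infer_instance

-- ===== CLAIM (what is proved, stated in full; the proofs are below) =====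
def Claim_equal_tx_mac_build : Prop := ∀ (contents : List Int), Dom_tx_mac_build contents → Spec_tx_mac_build contents (tx_mac_build contents)

-- ===== LEMMAS AND PROOFS =====

-- The complete adjacent pairs of a list: characterises what A's parity loop accumulates.
def pvPairs : List Int → List (Int × Int)
  | a :: b :: rest => (a, b) :: pvPairs rest
  | _ => []

theorem pv_getLast?_cons (b : Int) (rest : List Int) :
    (b :: rest).getLast? = some (rest.getLast?.getD b) := by
  induction rest generalizing b with
  | nil => rfl
  | cons c t ih =>
    rw [List.getLast?_cons_cons, ih c]
    simp

theorem pv_range_map_shift (ds : Int) (k m : Nat) :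
    (List.range (m + 1)).map (fun (i : Nat) => ds + (k : Int) + (i : Int))
      = (ds + (k : Int)) :: (List.range m).map (fun (i : Nat) => ds + ((k + 1 : Nat) : Int) + (i : Int)) := by
  rw [List.range_succ_eq_map, List.map_cons, List.map_map]
  congr 1
  · push_cast; ring
  · refine List.map_congr_left ?_
    intro i _
    simp only [Function.comp_apply]
    push_cast; ring

theorem tx_mac_build_loop (ds : Int) :
    ∀ (contents A V : List Int) (k : Nat) (ov : Option Int),
    contents.foldl (pvStepA ds) (A, V, 2 * (k : Int), ov)
    = (A ++ (List.range (pvPairs contents).length).map (fun (i : Nat) => ds + (k : Int) + (i : Int)),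
       V ++ (pvPairs contents).map (fun p => p.1 + p.2 * 256),
       2 * (k : Int) + contents.length,
       contents.getLast?.or ov)
  | [] => by intro A V k ov; simp [pvPairs]
  | [a] => by
    intro A V k ov
    simp only [List.foldl_cons, List.foldl_nil, pvStepA,
      if_neg (by omega : ¬ (2 * (k : Int)) % 2 = 1)]
    simp [pvPairs]
  | a :: b :: rest => by
    intro A V k ov
    simp only [List.foldl_cons, pvStepA,
      if_neg (by omega : ¬ (2 * (k : Int)) % 2 = 1),
      if_pos (by omega : (2 * (k : Int) + 1) % 2 = 1)]
    have hdiv : (2 * (k : Int) + 1) / 2 = (k : Int) := by omega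
    have hn : (2 * (k : Int) + 1 + 1) = 2 * ((k + 1 : Nat) : Int) := by push_cast; ring
    rw [hdiv, hn, tx_mac_build_loop ds rest]
    have hp : pvPairs (a :: b :: rest) = (a, b) :: pvPairs rest := rfl
    refine Prod.ext ?_ (Prod.ext ?_ (Prod.ext ?_ ?_))
    · simp only [hp, List.length_cons, pv_range_map_shift ds k (pvPairs rest).length,
        List.append_assoc, List.singleton_append]
    · simp [hp]
    · simp only [List.length_cons]; push_cast; ring
    · simp only [Option.some_or, pv_getLast?_cons a (b :: rest), pv_getLast?_cons b rest]
      simp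

theorem pvPairs_length : ∀ xs : List Int, (pvPairs xs).length = xs.length / 2
  | [] => rfl
  | [_] => by simp [pvPairs]
  | a :: b :: rest => by
    simp only [pvPairs, List.length_cons, pvPairs_length rest]
    omega

-- A's accumulated word list in B's slot-indexed form.
theorem pvPairs_map_indexed : ∀ xs : List Int,
    (pvPairs xs).map (fun p => p.1 + p.2 * 256)
      = (List.range (xs.length / 2)).map
          (fun (i : Nat) => xs[2 * i]?.getD 0 + xs[2 * i + 1]?.getD 0 * 256)
  | [] => rfl
  | [_] => by simp [pvPairs]
  | a :: b :: rest => by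
    have hlen : (a :: b :: rest).length / 2 = rest.length / 2 + 1 := by
      simp only [List.length_cons]; omega
    rw [hlen, List.range_succ_eq_map, List.map_cons, List.map_map]
    show (a + b * 256) :: (pvPairs rest).map (fun p => p.1 + p.2 * 256) = _
    refine congrArg₂ _ ?_ ?_
    · simp
    · rw [pvPairs_map_indexed rest]
      refine List.map_congr_left ?_
      intro i _
      simp only [Function.comp_apply, Nat.succ_eq_add_one]
      have e1 : (a :: b :: rest)[2 * (i + 1)]? = rest[2 * i]? := by
        rw [show 2 * (i + 1) = 2 * i + 1 + 1 from by omega]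
        simp
      have e2 : (a :: b :: rest)[2 * (i + 1) + 1]? = rest[2 * i + 1]? := by
        rw [show 2 * (i + 1) + 1 = 2 * i + 1 + 1 + 1 from by omega]
        simp
      rw [e1, e2]


-- ===== VERDICT (by name: the statement is the Claim_ definition above) =====
theorem tx_mac_build_spec : Claim_equal_tx_mac_build := by
  intro contents _
  unfold Spec_tx_mac_build
  show tx_mac_build contents = tx_mac_build_alt contents
  unfold tx_mac_build tx_mac_build_alt
  have h := tx_mac_build_loop (0x100000 + 16 + 1) contents [0x100000 + 1024 + 1] [0] 0 none
  simp only [Nat.cast_zero, mul_zero, zero_add] at h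
  simp only [h, Option.or_none, pvPairs_length, pvPairs_map_indexed,
    PySem.List.pyGet?_natCast, add_zero]
  -- the B-side slot map over range (len/2) has its condition always true
  have hcond : ∀ i ∈ List.range (contents.length / 2),
      (if 2 * (i : Int) + 1 < (contents.length : Int) then
          contents[2 * i]?.getD 0 + contents[2 * i + 1]?.getD 0 * 256
        else contents[2 * i]?.getD 0)
      = contents[2 * i]?.getD 0 + contents[2 * i + 1]?.getD 0 * 256 := by
    intro i hi
    rw [List.mem_range] at hi
    rw [if_pos (by omega)]
  by_cases hodd : (contents.length : Int) % 2 = 1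
  · have hlen : (contents.length + 1) / 2 = contents.length / 2 + 1 := by omega
    rw [if_pos hodd, hlen, List.range_succ, List.map_append, List.map_append,
      List.map_congr_left hcond]
    have hne : contents ≠ [] := by intro h'; subst h'; simp at hodd
    have hfalse : ¬ (2 * ((contents.length / 2 : Nat) : Int) + 1 < (contents.length : Int)) := by
      push_cast; omega
    have hidx : 2 * (contents.length / 2) = contents.length - 1 := by omega
    have hdiv : (contents.length : Int) / 2 = ((contents.length / 2 : Nat) : Int) := by
      push_cast; omega
    simp only [List.map_cons, List.map_nil, if_neg hfalse, hidx, hdiv,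
      List.getLast?_eq_getElem?]
    simp [List.append_assoc]
  · have hlen : (contents.length + 1) / 2 = contents.length / 2 := by omega
    rw [if_neg hodd, hlen, List.map_congr_left hcond]
    simp
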